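-- pv_equiv track=rewrite | github.com/CS-Edwards/ibm-granite-emerald | utils.py | special_delim_token
-- ===== SOURCE A (Python) =====
-- def special_delim_token(input_text: str) -> str:
--     """
--     Adds a special delimiter token to each node/edge/node entry in the input text to facilitate
--     code generation accuracy in code-LLMs.
--
--     Args:
--         input_text (str): The input text containing node/edge/node entries, separated by newlines.
--
--     Returns:
--         str: The processed text with a special delimiter token added after each line.
--
--     Raises:
--         ValueError: If input_text is not a string or is empty.
--     """
--     if not isinstance(input_text, str):
--         raise ValueError("Input must be a string.")
--
--     if not input_text.strip():  # Check if the input text is empty or just whitespace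
--         return ""
--
--     # Split the input text into lines, process each line, and add the delimiter
--     lines = input_text.strip().split('\n')
--     lines_with_delimiter = [line + " |<special-end-tok>|" for line in lines]
--
--     # Join the processed lines back into a single string
--     special_token_output_str = '\n'.join(lines_with_delimiter)
--
--     return special_token_output_str
-- ===== SOURCE B (Python) =====
-- def special_delim_token(input_text: str) -> str:
--     if not isinstance(input_text, str):
--         raise ValueError("Input must be a string.")
--     s = input_text.strip()
--     if not s:
--         return ""
--     # One whole-string substitution instead of split/list/join per line.
--     return s.replace('\n', ' |<special-end-tok>|\n') + ' |<special-end-tok>|'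
-- ===== Notes on version B (the rewrite author's own statement) =====
-- stated objective: simpler
-- what changed: Replaces the split-into-lines / per-line list comprehension / join pipeline by a single whole-string str.replace of each newline with the token plus newline, then one final token append, so no line list is built.
import Mathlib
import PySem

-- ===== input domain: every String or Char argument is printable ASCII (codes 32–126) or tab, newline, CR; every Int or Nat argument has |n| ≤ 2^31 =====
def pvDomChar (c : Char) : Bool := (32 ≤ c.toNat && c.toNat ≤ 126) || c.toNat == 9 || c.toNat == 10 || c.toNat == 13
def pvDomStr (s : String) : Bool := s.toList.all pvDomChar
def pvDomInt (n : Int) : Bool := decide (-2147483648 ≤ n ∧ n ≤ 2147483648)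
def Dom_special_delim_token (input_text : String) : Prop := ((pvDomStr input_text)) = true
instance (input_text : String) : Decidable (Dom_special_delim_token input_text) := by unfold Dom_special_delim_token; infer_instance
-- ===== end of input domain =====

-- B replaces A's split-into-lines / per-line comprehension / join pipeline by one whole-string
-- replace of '\n' with the token plus '\n' followed by a single final token append (objective: simpler).

-- ===== PORT A =====
-- A: guard on blank input, then strip, split on '\n', append the token to every line, rejoin.
-- (the isinstance guard is vacuous under the String type; strings are handled as their char lists)
def special_delim_token (input_text : String) : String :=
  if PySem.Chars.strip input_text.toList = [] then ""
  else
    let lines := PySem.Chars.splitOn (PySem.Chars.strip input_text.toList) ['\n']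
    let lines_with_delimiter := lines.map (fun line => line ++ " |<special-end-tok>|".toList)
    String.mk (PySem.Chars.join ['\n'] lines_with_delimiter)

-- ===== PORT B =====
def special_delim_token_alt (input_text : String) : String :=
  let s := PySem.Chars.strip input_text.toList
  if s = [] then ""
  else String.mk (PySem.Chars.replace s ['\n'] " |<special-end-tok>|\n".toList
                    ++ " |<special-end-tok>|".toList)

-- ===== PRECONDITION & SPEC =====
def Spec_special_delim_token (input_text : String) (out : String) : Prop := out = special_delim_token_alt input_text
instance (input_text : String) (out : String) : Decidable (Spec_special_delim_token input_text out) := by unfold Spec_special_delim_token; infer_instance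

-- ===== CLAIM (what is proved, stated in full; the proofs are below) =====
def Claim_equal_special_delim_token : Prop := ∀ (input_text : String), Dom_special_delim_token input_text → Spec_special_delim_token input_text (special_delim_token input_text)

-- ===== LEMMAS AND PROOFS =====

def spNL : List Char → List Char → List (List Char)
  | pre, [] => [pre]
  | pre, x :: xs => if x = '\n' then pre :: spNL [] xs else spNL (pre ++ [x]) xs

theorem go_eq (fuel : Nat) : ∀ (l cur : List Char) (acc : List (List Char)), l.length < fuel →
    PySem.Chars.splitOn.go ['\n'] fuel l cur acc = acc.reverse ++ spNL cur.reverse l := by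
  induction fuel with
  | zero => intro l cur acc h; omega
  | succ f ih =>
    intro l cur acc h
    match l with
    | [] => rw [PySem.Chars.splitOn.go.eq_def]; simp [spNL]
    | x :: xs =>
      rw [PySem.Chars.splitOn.go.eq_def]
      by_cases hx : x = '\n'
      · subst hx
        simp only [List.isPrefixOf, spNL, List.length_cons, List.length_nil, List.drop_succ_cons,
          List.drop_zero, beq_self_eq_true, Bool.and_true, if_true]
        rw [ih xs [] (cur.reverse :: acc) (by simp at h; omega)]
        simp
      · have hp : ('\n' == x && true) = false := by
          simp; exact fun hc => hx hc.symm
        simp only [List.isPrefixOf, hp, Bool.false_eq_true, if_false]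
        rw [ih xs (x :: cur) acc (by simp at h ⊢; omega)]
        simp [spNL, hx]

theorem spNL_ne_nil (pre l : List Char) : spNL pre l ≠ [] := by
  induction l generalizing pre with
  | nil => simp [spNL]
  | cons x xs ih => simp only [spNL]; split <;> simp [ih]

def flatNL (t : List Char) (l : List Char) : List Char :=
  l.flatMap (fun x => if x = '\n' then t ++ ['\n'] else [x])

theorem join_spNL (t : List Char) : ∀ (l pre : List Char),
    PySem.Chars.join ['\n'] ((spNL pre l).map (· ++ t)) = pre ++ flatNL t l ++ t := by
  intro l
  induction l with
  | nil => intro pre; simp [spNL, flatNL, PySem.Chars.join, List.intercalate]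
  | cons x xs ih =>
    intro pre
    by_cases hx : x = '\n'
    · subst hx
      simp only [spNL, if_true]
      rcases hs : spNL [] xs with _ | ⟨a, rest⟩
      · exact absurd hs (spNL_ne_nil [] xs)
      · have hI := ih []
        rw [hs] at hI
        simp only [List.map_cons] at hI ⊢
        rw [PySem.Chars.join_cons_cons, hI]
        simp [flatNL]
    · simp only [spNL, if_neg hx]
      rw [ih (pre ++ [x])]
      simp [flatNL, hx]

theorem replace_go_eq (t : List Char) (fuel : Nat) : ∀ (l acc : List Char),
    l.length ≤ fuel →
    PySem.Chars.replace.go ['\n'] (t ++ ['\n']) fuel l acc = acc.reverse ++ flatNL t l := by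
  induction fuel with
  | zero => intro l acc h
            rw [PySem.Chars.replace.go.eq_def]
            have : l = [] := by cases l <;> simp_all
            subst this; simp [flatNL]
  | succ f ih =>
    intro l acc h
    match l with
    | [] => rw [PySem.Chars.replace.go.eq_def]; simp [flatNL]
    | x :: xs =>
      rw [PySem.Chars.replace.go.eq_def]
      by_cases hx : x = '\n'
      · subst hx
        simp only [List.isPrefixOf, beq_self_eq_true, Bool.and_true,
          if_true, List.length_singleton, List.drop_succ_cons, List.drop_zero]
        rw [ih xs (List.reverse (t ++ ['\n']) ++ acc) (by simp at h; omega)]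
        simp [flatNL]
      · have hp : ('\n' == x && true) = false := by simp; exact fun hc => hx hc.symm
        simp only [List.isPrefixOf, hp, Bool.false_eq_true, if_false]
        rw [ih xs (x :: acc) (by simp at h; omega)]
        simp [flatNL, hx]

theorem core_eq (s : List Char) :
    PySem.Chars.join ['\n'] ((PySem.Chars.splitOn s ['\n']).map (· ++ " |<special-end-tok>|".toList))
      = PySem.Chars.replace s ['\n'] " |<special-end-tok>|\n".toList ++ " |<special-end-tok>|".toList := by
  have h1 : PySem.Chars.splitOn s ['\n'] = spNL [] s := by
    have := go_eq (s.length + 1) s [] [] (by omega)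
    simpa [PySem.Chars.splitOn] using this
  have h2 : PySem.Chars.replace s ['\n'] " |<special-end-tok>|\n".toList
      = flatNL " |<special-end-tok>|".toList s := by
    have := replace_go_eq " |<special-end-tok>|".toList s.length s [] (le_refl _)
    simpa [PySem.Chars.replace] using this
  rw [h1, h2]
  have := join_spNL " |<special-end-tok>|".toList s []
  simpa using this

-- ===== VERDICT (by name: the statement is the Claim_ definition above) =====
theorem special_delim_token_spec : Claim_equal_special_delim_token := by
  intro input_text _
  unfold Spec_special_delim_token special_delim_token special_delim_token_alt
  by_cases h : PySem.Chars.strip input_text.toList = []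
  · simp [h]
  · simp only [h, if_false]
    rw [core_eq]
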